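-- pv_equiv track=rewrite | github.com/KexinZheng5/permutation-test-acceleration | CNN/.ipynb_checkpoints/test_statistics-checkpoint.py | dmax
-- ===== SOURCE A (Python) =====
-- def dmax(dy, y):
--     maximum = y[0]
--     ind = 0
--     for k in range(1, len(y)):
--         if y[k] > maximum:
--             maximum = y[k]
--             ind = k
--     return dy[ind]
-- ===== SOURCE B (Python) =====
-- def dmax(dy, y):
--     return dy[y.index(max(y))]
-- ===== Notes on version B (the rewrite author's own statement) =====
-- stated objective: simpler
-- what changed: Replaced the manual single-pass argmax loop (tracking running maximum and index) by the one-liner dy[y.index(max(y))]: compute the maximum with max, locate its first position with list.index.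
import Mathlib
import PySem

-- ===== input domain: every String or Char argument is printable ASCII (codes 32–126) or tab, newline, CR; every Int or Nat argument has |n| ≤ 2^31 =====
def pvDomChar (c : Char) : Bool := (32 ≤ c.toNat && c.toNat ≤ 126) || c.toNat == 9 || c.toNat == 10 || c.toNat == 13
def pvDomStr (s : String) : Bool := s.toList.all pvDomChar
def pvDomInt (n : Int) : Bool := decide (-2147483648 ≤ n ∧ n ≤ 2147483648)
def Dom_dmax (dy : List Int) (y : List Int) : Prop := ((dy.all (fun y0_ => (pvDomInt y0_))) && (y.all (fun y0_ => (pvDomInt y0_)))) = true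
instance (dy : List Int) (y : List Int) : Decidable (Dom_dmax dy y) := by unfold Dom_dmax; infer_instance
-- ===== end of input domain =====

-- B replaces A's manual argmax loop by dy[y.index(max(y))] (simpler two-pass decomposition); equal on all inputs where A returns.

-- ===== PORT A =====
def dmax (dy : List Int) (y : List Int) : Int :=
  let maximum := (PySem.List.pyGet? y 0).getD 0   -- y[0]; Pre_ excludes y = [] (IndexError)
  let st := (PySem.List.pyRange 1 (PySem.List.len y) 1).foldl
      (fun (s : Int × Int) k =>
        if PySem.List.pyGetD y k 0 > s.1 then (PySem.List.pyGetD y k 0, k) else s)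
      (maximum, 0)
  (PySem.List.pyGet? dy st.2).getD 0             -- dy[ind]; Pre_ excludes out-of-range (IndexError)

-- ===== PORT B =====
def dmax_alt (dy : List Int) (y : List Int) : Int :=
  match PySem.List.max? y (fun v => v) with      -- max(y); raises on y = [], excluded by Pre_
  | none => 0
  | some m =>
    match PySem.List.index? y m with             -- y.index(max(y))
    | none => 0
    | some i => (PySem.List.pyGet? dy (i : Int)).getD 0   -- dy[...]; out-of-range excluded by Pre_

-- ===== PRECONDITION & SPEC =====
-- Pre_ excludes exactly the inputs where A raises IndexError: empty y (y[0]),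
-- and dy too short for the first argmax position of y (dy[ind]); B also raises on both.
def Pre_dmax (dy : List Int) (y : List Int) : Prop :=
  y ≠ [] ∧ List.idxOf (y.tail.foldl max (y.headD 0)) y < dy.length
instance (dy : List Int) (y : List Int) : Decidable (Pre_dmax dy y) := by unfold Pre_dmax; infer_instance
def pvWitness_dmax : List Int × List Int := ([5, 7], [1, 3, 2])

def Spec_dmax (dy : List Int) (y : List Int) (out : Int) : Prop := out = dmax_alt dy y
instance (dy : List Int) (y : List Int) (out : Int) : Decidable (Spec_dmax dy y out) := by unfold Spec_dmax; infer_instance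

-- ===== CLAIM (what is proved, stated in full; the proofs are below) =====
def Claim_equal_dmax : Prop := ∀ (dy : List Int) (y : List Int), Dom_dmax dy y → Pre_dmax dy y → Spec_dmax dy y (dmax dy y)

-- ===== LEMMAS AND PROOFS =====

-- A's range loop over y, read as a fold over the enumerated tail of y.
theorem foldA_enum {α : Type} (y : List Int) (f : α → Int → Int → α) :
    ∀ (n j : Nat) (init : α), y.length - j ≤ n →
    (PySem.List.pyRange (j : Int) (PySem.List.len y) 1).foldl
        (fun a k => f a (PySem.List.pyGetD y k 0) k) init
      = (PySem.List.enumerate (y.drop j) (j : Int)).foldl (fun a p => f a p.2 p.1) init := by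
  intro n
  induction n with
  | zero =>
    intro j init h
    have hj : y.length ≤ j := by omega
    rw [List.drop_eq_nil_of_le hj, PySem.List.pyRange_one_eq_nil]
    · simp [PySem.List.enumerate]
    · simp; exact_mod_cast hj
  | succ n ih =>
    intro j init h
    by_cases hj : j < y.length
    · have hcons : PySem.List.pyRange (j : Int) (PySem.List.len y) 1
          = (j : Int) :: PySem.List.pyRange ((j : Int) + 1) (PySem.List.len y) 1 := by
        apply PySem.List.pyRange_one_cons
        simp; exact_mod_cast hj
      have hdrop : y.drop j = y[j] :: y.drop (j + 1) := List.drop_eq_getElem_cons hj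
      have hget : PySem.List.pyGetD y (j : Int) 0 = y[j] := by
        rw [PySem.List.pyGetD_eq_getElem]
        · simp
        · exact_mod_cast Int.natCast_nonneg j
        · simp; exact_mod_cast hj
      rw [hcons, hdrop]
      simp only [List.foldl_cons, PySem.List.enumerate_cons, hget]
      have : ((j : Int) + 1) = ((j + 1 : Nat) : Int) := by push_cast; ring
      rw [this, ih (j + 1) _ (by omega)]
    · have hj' : y.length ≤ j := by omega
      rw [List.drop_eq_nil_of_le hj', PySem.List.pyRange_one_eq_nil]
      · simp [PySem.List.enumerate]
      · simp [PySem.List.len]; exact_mod_cast hj'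

-- Invariant of A's argmax loop: the running pair is (max of the prefix, its first index).
theorem argmax_inv : ∀ (t p : List Int) (m : Int) (i : Nat),
    PySem.List.max? p (fun v => v) = some m →
    PySem.List.index? p m = some i →
    (PySem.List.max? (p ++ t) (fun v => v)
        = some ((PySem.List.enumerate t (p.length : Int)).foldl
            (fun s q => if q.2 > s.1 then (q.2, q.1) else s) (m, (i : Int))).1) ∧
    (PySem.List.index? (p ++ t)
        ((PySem.List.enumerate t (p.length : Int)).foldl
            (fun s q => if q.2 > s.1 then (q.2, q.1) else s) (m, (i : Int))).1
        = some ((PySem.List.enumerate t (p.length : Int)).foldl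
            (fun s q => if q.2 > s.1 then (q.2, q.1) else s) (m, (i : Int))).2.toNat) ∧
    ((((PySem.List.enumerate t (p.length : Int)).foldl
            (fun s q => if q.2 > s.1 then (q.2, q.1) else s) (m, (i : Int))).2.toNat : Int)
        = ((PySem.List.enumerate t (p.length : Int)).foldl
            (fun s q => if q.2 > s.1 then (q.2, q.1) else s) (m, (i : Int))).2) := by
  intro t
  induction t with
  | nil =>
    intro p m i hmax hidx
    simp only [PySem.List.enumerate_nil, List.foldl_nil, List.append_nil]
    exact ⟨hmax, by simpa using hidx, by simp⟩
  | cons b t ih =>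
    intro p m i hmax hidx
    -- shape of p and the max over p ++ [b]
    obtain ⟨c, s, rfl⟩ : ∃ c s, p = c :: s := by
      cases p with
      | nil => simp [PySem.List.max?] at hmax
      | cons c s => exact ⟨c, s, rfl⟩
    have hm : m = s.foldl max c := by
      rw [PySem.List.max?_id_cons] at hmax; exact (Option.some_inj.mp hmax).symm
    have hmax' : PySem.List.max? ((c :: s) ++ [b]) (fun v => v)
        = some (if b > m then b else m) := by
      rw [List.cons_append, PySem.List.max?_id_cons, List.foldl_append]
      simp [hm]
      by_cases hb : s.foldl max c < b
      · simp [max_eq_right (le_of_lt hb), hb]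
      · simp [max_eq_left (by omega : b ≤ s.foldl max c)]; omega
    have hmem : m ∈ (c :: s) := PySem.List.max?_mem hmax
    have hle : ∀ x ∈ (c :: s), x ≤ m := by
      intro x hx; exact PySem.List.max?_isMax hmax x hx
    have hidx' : PySem.List.index? ((c :: s) ++ [b]) (if b > m then b else m)
        = some (if b > m then (c :: s).length else i) := by
      by_cases hb : b > m
      · simp only [hb, if_pos]
        have hbn : b ∉ (c :: s) := fun hbm => absurd (hle b hbm) (by omega)
        exact PySem.List.index?_append_singleton_self (c :: s) b hbn
      · simp only [hb, if_false]
        rw [PySem.List.index?_append_of_mem _ hmem, hidx]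
    -- fold one step, then apply the IH at the longer prefix
    have hstep : (PySem.List.enumerate (b :: t) (((c :: s)).length : Int)).foldl
          (fun (st : Int × Int) q => if q.2 > st.1 then (q.2, q.1) else st) (m, (i : Int))
        = (PySem.List.enumerate t ((((c :: s) ++ [b])).length : Int)).foldl
          (fun st q => if q.2 > st.1 then (q.2, q.1) else st)
          ((if b > m then b else m), (((if b > m then (c :: s).length else i) : Nat) : Int)) := by
      rw [PySem.List.enumerate_cons]
      simp only [List.foldl_cons, List.length_append, List.length_cons]
      by_cases hb : b > m <;> simp [hb]
    rw [hstep]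
    have := ih ((c :: s) ++ [b]) (if b > m then b else m)
        (if b > m then (c :: s).length else i) hmax' hidx'
    rwa [List.append_assoc, List.singleton_append] at this

-- ===== VERDICT (by name: the statement is the Claim_ definition above) =====
theorem dmax_spec : Claim_equal_dmax := by
  intro dy y _ hpre
  obtain ⟨hne, _⟩ := hpre
  obtain ⟨a, t, rfl⟩ : ∃ a t, y = a :: t := by
    cases y with
    | nil => exact absurd rfl hne
    | cons a t => exact ⟨a, t, rfl⟩
  have henum := foldA_enum (α := Int × Int) (a :: t)
      (fun st v k => if v > st.1 then (v, k) else st) ((a :: t).length) 1 ((a, 0) : Int × Int)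
      (by omega)
  simp only [List.drop_one, List.tail_cons, Nat.cast_one] at henum
  have hinv := argmax_inv t [a] a 0 (by rw [PySem.List.max?_id_cons]; rfl)
      (PySem.List.index?_cons_self a [])
  simp only [List.length_cons, List.length_nil, List.singleton_append, Nat.cast_zero,
    Nat.zero_add, Nat.cast_one] at hinv
  obtain ⟨hmax, hidx, hcast⟩ := hinv
  have h0 : (PySem.List.pyGet? (a :: t) 0).getD 0 = a := by
    simp [PySem.List.pyGet?, PySem.List.pyIdx?]
  unfold Spec_dmax dmax dmax_alt
  simp only [h0, henum, hmax, hidx]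
  rw [hcast]
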